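-- pv_equiv track=rewrite | github.com/PaulSff/ai-taskvector | units/data_bi/formulas_calc/formulas_calc.py | _excel_model_find_sol_key
-- ===== SOURCE A (Python) =====
-- from typing import Any, Dict, List, Tuple
--
-- def _excel_model_cell_token(sol_key: str) -> str:
--     ks = str(sol_key)
--     if "!" not in ks:
--         return ks.strip().strip("'").upper()
--     return ks.rsplit("!", 1)[-1].strip().strip("'").upper()
--
-- def _excel_model_sheet_blob_lower(sol_key: str) -> str:
--     ks = str(sol_key)
--     if "!" not in ks:
--         return ""
--     left = ks.rsplit("!", 1)[0]
--     return left.lower()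
--
-- def _excel_model_find_sol_key(
--     sol: dict[Any, Any],
--     user_sheet_hint: str | None,
--     addr_token: str,
-- ) -> str | None:
--     at = addr_token.strip().upper()
--     candidates = [k for k in sol if _excel_model_cell_token(str(k)) == at]
--     if not candidates:
--         return None
--     if user_sheet_hint:
--         h = user_sheet_hint.strip().lower()
--         for k in candidates:
--             if h in _excel_model_sheet_blob_lower(str(k)):
--                 return str(k)
--     return str(candidates[0])
-- ===== SOURCE B (Python) =====
-- def _excel_model_cell_token(sol_key: str) -> str:
--     ks = str(sol_key)
--     if "!" not in ks:
--         return ks.strip().strip("'").upper()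
--     return ks.rsplit("!", 1)[-1].strip().strip("'").upper()
--
--
-- def _excel_model_sheet_blob_lower(sol_key: str) -> str:
--     ks = str(sol_key)
--     if "!" not in ks:
--         return ""
--     return ks.rsplit("!", 1)[0].lower()
--
--
-- def _excel_model_find_sol_key(sol, user_sheet_hint, addr_token):
--     at = addr_token.strip().upper()
--     h = user_sheet_hint.strip().lower() if user_sheet_hint else None
--     first_match = None
--     first_hint_match = None
--     for k in sol:
--         if _excel_model_cell_token(str(k)) != at:
--             continue
--         if first_match is None:
--             first_match = k
--         if h is not None and first_hint_match is None and h in _excel_model_sheet_blob_lower(str(k)):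
--             first_hint_match = k
--     if first_match is None:
--         return None
--     return str(first_hint_match if first_hint_match is not None else first_match)
-- ===== Notes on version B (the rewrite author's own statement) =====
-- stated objective: simpler
-- what changed: A builds the full candidate list and then re-scans it for a hint match; B makes a single pass over sol tracking only first_match and first_hint_match, then picks between the two.
import Mathlib
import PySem

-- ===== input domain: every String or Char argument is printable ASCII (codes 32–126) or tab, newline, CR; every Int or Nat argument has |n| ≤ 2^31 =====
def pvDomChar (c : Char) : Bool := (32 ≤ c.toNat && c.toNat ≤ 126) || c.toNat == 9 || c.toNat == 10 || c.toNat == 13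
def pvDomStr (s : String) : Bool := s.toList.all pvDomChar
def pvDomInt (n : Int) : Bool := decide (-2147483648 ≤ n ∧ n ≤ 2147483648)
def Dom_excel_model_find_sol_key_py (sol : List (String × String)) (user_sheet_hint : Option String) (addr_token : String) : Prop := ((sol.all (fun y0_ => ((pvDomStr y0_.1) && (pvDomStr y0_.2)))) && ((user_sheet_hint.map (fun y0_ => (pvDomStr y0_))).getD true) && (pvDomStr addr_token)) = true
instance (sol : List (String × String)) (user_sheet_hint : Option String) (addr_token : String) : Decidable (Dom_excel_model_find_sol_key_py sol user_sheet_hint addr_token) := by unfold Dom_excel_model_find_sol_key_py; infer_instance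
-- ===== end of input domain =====

-- B merges A's two phases (build candidate list, then scan it for a hint match) into one
-- loop over sol that tracks the first matching key and the first hint-matching key (objective: simpler).

-- ===== PORT A =====
-- shared module helper _excel_model_cell_token; ks.rsplit("!",1)[-1] is exactly the
-- substring after the last '!' (PySem.Str.rfind / slice), taken only when "!" ∈ ks.
def pvCellToken (ks : String) : String :=
  if PySem.Str.isIn "!" ks = false then
    PySem.Str.upper (PySem.Str.stripChars (PySem.Str.strip ks) "'")
  else
    PySem.Str.upper (PySem.Str.stripChars
      (PySem.Str.strip (PySem.Str.slice ks (some (PySem.Str.rfind ks "!" + 1)) none)) "'")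

-- shared module helper _excel_model_sheet_blob_lower; ks.rsplit("!",1)[0] = ks[:rfind]
def pvSheetBlobLower (ks : String) : String :=
  if PySem.Str.isIn "!" ks = false then ""
  else PySem.Str.lower (PySem.Str.slice ks none (some (PySem.Str.rfind ks "!")))

def excel_model_find_sol_key_py (sol : List (String × String)) (user_sheet_hint : Option String) (addr_token : String) : Option String :=
  let at_ := PySem.Str.upper (PySem.Str.strip addr_token)
  let candidates := (sol.map Prod.fst).filter (fun k => pvCellToken k == at_)
  match candidates with
  | [] => none
  | c0 :: _ =>
    match user_sheet_hint with
    | some hs =>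
      if hs ≠ "" then
        let h := PySem.Str.lower (PySem.Str.strip hs)
        match candidates.find? (fun k => PySem.Str.isIn h (pvSheetBlobLower k)) with
        | some k => some k
        | none => some c0
      else some c0
    | none => some c0

-- ===== PORT B =====
-- one pass over sol: state = (first_match, first_hint_match)
def pvStepB (at_ : String) (h? : Option String)
    (st : Option String × Option String) (kv : String × String) :
    Option String × Option String :=
  if pvCellToken kv.1 == at_ then
    ((if st.1.isNone then some kv.1 else st.1),
     (if (match h? with
          | some h => st.2.isNone && PySem.Str.isIn h (pvSheetBlobLower kv.1)
          | none => false) then some kv.1 else st.2))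
  else st

def excel_model_find_sol_key_py_alt (sol : List (String × String)) (user_sheet_hint : Option String) (addr_token : String) : Option String :=
  let at_ := PySem.Str.upper (PySem.Str.strip addr_token)
  let h? : Option String := match user_sheet_hint with
    | some hs => if hs ≠ "" then some (PySem.Str.lower (PySem.Str.strip hs)) else none
    | none => none
  let st := sol.foldl (pvStepB at_ h?) (none, none)
  match st.1 with
  | none => none
  | some k0 => match st.2 with
    | some k1 => some k1
    | none => some k0

-- ===== PRECONDITION & SPEC =====
def Spec_excel_model_find_sol_key_py (sol : List (String × String)) (user_sheet_hint : Option String) (addr_token : String) (out : Option String) : Prop := out = excel_model_find_sol_key_py_alt sol user_sheet_hint addr_token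
instance (sol : List (String × String)) (user_sheet_hint : Option String) (addr_token : String) (out : Option String) : Decidable (Spec_excel_model_find_sol_key_py sol user_sheet_hint addr_token out) := by unfold Spec_excel_model_find_sol_key_py; infer_instance

-- ===== CLAIM (what is proved, stated in full; the proofs are below) =====
def Claim_equal_excel_model_find_sol_key_py : Prop := ∀ (sol : List (String × String)) (user_sheet_hint : Option String) (addr_token : String), Dom_excel_model_find_sol_key_py sol user_sheet_hint addr_token → Spec_excel_model_find_sol_key_py sol user_sheet_hint addr_token (excel_model_find_sol_key_py sol user_sheet_hint addr_token)

-- ===== LEMMAS AND PROOFS =====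

theorem pvFind?_false {α : Type} (l : List α) : l.find? (fun _ => false) = none := by
  induction l with
  | nil => rfl
  | cons a t ih => simp [List.find?, ih]

-- the fold's state components are "first match so far" and "first hint match so far"
theorem pvFoldB_spec (at_ : String) (h? : Option String) (sol : List (String × String))
    (st : Option String × Option String) :
    sol.foldl (pvStepB at_ h?) st =
      ((st.1.orElse (fun _ => (((sol.map Prod.fst).filter (fun k => pvCellToken k == at_)).head?))),
       (st.2.orElse (fun _ => (((sol.map Prod.fst).filter (fun k => pvCellToken k == at_)).find?
          (fun k => match h? with
            | some h => PySem.Str.isIn h (pvSheetBlobLower k)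
            | none => false))))) := by
  induction sol generalizing st with
  | nil =>
    obtain ⟨a, b⟩ := st
    cases a <;> cases b <;> rfl
  | cons kv rest ih =>
    obtain ⟨a, b⟩ := st
    rw [List.foldl_cons, ih]
    unfold pvStepB
    rw [List.map_cons, List.filter_cons]
    dsimp only
    by_cases hp : (pvCellToken kv.1 == at_) = true
    · rw [if_pos hp, if_pos hp]
      dsimp only
      rw [Prod.mk.injEq]
      refine ⟨?_, ?_⟩
      · cases a <;> rfl
      · cases b with
        | some x => cases h? <;> rfl
        | none =>
          cases h? with
          | none => rfl
          | some h =>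
            by_cases hq : PySem.Str.isIn h (pvSheetBlobLower kv.1) = true
            · rw [if_pos (by simpa using hq),
                List.find?_cons_of_pos (p := fun k => (match (some h : Option String) with
                  | some h => PySem.Str.isIn h (pvSheetBlobLower k) | none => false))
                  (a := kv.1) (by simpa using hq)]
              rfl
            · simp only [Bool.not_eq_true] at hq
              rw [if_neg (by simpa using hq),
                List.find?_cons_of_neg (p := fun k => (match (some h : Option String) with
                  | some h => PySem.Str.isIn h (pvSheetBlobLower k) | none => false))
                  (a := kv.1) (by simpa using hq)]
    · rw [if_neg hp, if_neg hp]

theorem pvFoldB_run_none (at_ : String) (sol : List (String × String)) :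
    sol.foldl (pvStepB at_ none) (none, none) =
      ((((sol.map Prod.fst).filter (fun k => pvCellToken k == at_)).head?), none) := by
  rw [pvFoldB_spec]
  exact congrArg _ (pvFind?_false _)

theorem pvFoldB_run_some (at_ h : String) (sol : List (String × String)) :
    sol.foldl (pvStepB at_ (some h)) (none, none) =
      ((((sol.map Prod.fst).filter (fun k => pvCellToken k == at_)).head?),
       (((sol.map Prod.fst).filter (fun k => pvCellToken k == at_)).find?
          (fun k => PySem.Str.isIn h (pvSheetBlobLower k)))) := by
  rw [pvFoldB_spec]
  rfl

-- ===== VERDICT (by name: the statement is the Claim_ definition above) =====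
theorem excel_model_find_sol_key_py_spec : Claim_equal_excel_model_find_sol_key_py := by
  intro sol hint addr _
  unfold Spec_excel_model_find_sol_key_py
  cases hint with
  | none =>
    simp only [excel_model_find_sol_key_py, excel_model_find_sol_key_py_alt]
    rw [pvFoldB_run_none]
    cases hcs : (sol.map Prod.fst).filter
        (fun k => pvCellToken k == PySem.Str.upper (PySem.Str.strip addr)) with
    | nil => rfl
    | cons c0 cs => rfl
  | some hs =>
    simp only [excel_model_find_sol_key_py, excel_model_find_sol_key_py_alt]
    by_cases h0 : hs ≠ ""
    · simp only [if_pos h0]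
      rw [pvFoldB_run_some]
      cases hcs : (sol.map Prod.fst).filter
          (fun k => pvCellToken k == PySem.Str.upper (PySem.Str.strip addr)) with
      | nil => rfl
      | cons c0 cs => rfl
    · simp only [if_neg h0]
      rw [pvFoldB_run_none]
      cases hcs : (sol.map Prod.fst).filter
          (fun k => pvCellToken k == PySem.Str.upper (PySem.Str.strip addr)) with
      | nil => rfl
      | cons c0 cs => rfl
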